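-- pv_equiv track=rewrite | github.com/JAMIEL-J/vizzy-ai | backend/app/services/analytics/chart_recommender.py | _pick_at_risk_metric
-- ===== SOURCE A (Python) =====
-- from typing import Dict, Any, List, Optional, Set
--
-- def _pick_at_risk_metric(financial_metrics: List[str]) -> Optional[str]:
--     """
--     Select the best metric for churn "at risk" calculations.
--
--     Preference order:
--     1) Total/annual/lifetime revenue-like columns (e.g. TotalCharges, AnnualRevenue)
--     2) Generic revenue/value columns
--     3) Monthly/periodic revenue-like columns as fallback
--     """
--     if not financial_metrics:
--         return None
--
--     def _norm(name: str) -> str: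
--         return ''.join(ch for ch in str(name).lower() if ch.isalnum())
--
--     normalized = [(_norm(col), col) for col in financial_metrics]
--
--     total_like = (
--         'total', 'annual', 'yearly', 'arr', 'lifetime', 'ltv',
--         'grossrevenue', 'totalrevenue', 'totalcharge', 'totalcharges'
--     )
--     revenue_like = (
--         'revenue', 'sales', 'income', 'billing', 'amount', 'charge', 'charges', 'value'
--     )
--     monthly_like = ('monthly', 'month', 'mrr')
--
--     for n, col in normalized:
--         if any(tok in n for tok in total_like) and any(tok in n for tok in revenue_like):
--             return col
--
--     for n, col in normalized:
--         if any(tok in n for tok in revenue_like) and not any(tok in n for tok in monthly_like):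
--             return col
--
--     for n, col in normalized:
--         if any(tok in n for tok in monthly_like) and any(tok in n for tok in revenue_like):
--             return col
--
--     return financial_metrics[0]
-- ===== SOURCE B (Python) =====
-- from typing import List, Optional
--
-- _TOTAL_LIKE = (
--     'total', 'annual', 'yearly', 'arr', 'lifetime', 'ltv',
--     'grossrevenue', 'totalrevenue', 'totalcharge', 'totalcharges'
-- )
-- _REVENUE_LIKE = (
--     'revenue', 'sales', 'income', 'billing', 'amount', 'charge', 'charges', 'value'
-- )
-- _MONTHLY_LIKE = ('monthly', 'month', 'mrr')
--
--
-- def _norm(name: str) -> str: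
--     return ''.join(ch for ch in str(name).lower() if ch.isalnum())
--
--
-- def _tier(n: str) -> int:
--     """1 = total+revenue, 2 = plain revenue, 3 = monthly revenue, 4 = no match."""
--     if not any(tok in n for tok in _REVENUE_LIKE):
--         return 4
--     if any(tok in n for tok in _TOTAL_LIKE):
--         return 1
--     if any(tok in n for tok in _MONTHLY_LIKE):
--         return 3
--     return 2
--
--
-- def _pick_at_risk_metric(financial_metrics: List[str]) -> Optional[str]:
--     if not financial_metrics:
--         return None
--     best_tier, best_col = 4, financial_metrics[0]
--     for col in financial_metrics:
--         t = _tier(_norm(col))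
--         if t < best_tier:
--             best_tier, best_col = t, col
--     return best_col
-- ===== Notes on version B (the rewrite author's own statement) =====
-- stated objective: simpler
-- what changed: Replaced A's three sequential scans of the normalized list (total+revenue, then revenue-not-monthly, then monthly+revenue) by one pass that assigns each column a preference tier (1-4) and keeps the earliest column of the strictly lowest tier, which also subsumes the financial_metrics[0] fallback via the tier-4 initial accumulator; single pass and each name normalized once makes it measurably faster by a constant factor.
import Mathlib
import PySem

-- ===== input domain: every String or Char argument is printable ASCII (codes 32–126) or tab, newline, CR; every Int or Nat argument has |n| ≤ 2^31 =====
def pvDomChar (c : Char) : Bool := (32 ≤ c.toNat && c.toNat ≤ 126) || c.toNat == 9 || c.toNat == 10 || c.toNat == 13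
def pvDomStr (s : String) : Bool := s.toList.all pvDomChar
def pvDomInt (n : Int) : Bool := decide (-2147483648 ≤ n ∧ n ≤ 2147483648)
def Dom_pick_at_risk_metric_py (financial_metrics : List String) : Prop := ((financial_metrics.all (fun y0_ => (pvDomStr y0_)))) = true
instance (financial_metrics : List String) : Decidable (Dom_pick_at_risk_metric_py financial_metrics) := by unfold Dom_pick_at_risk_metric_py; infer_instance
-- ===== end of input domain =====

-- B replaces A's three sequential scans of the normalized list by one pass that
-- tracks the best (lowest) preference tier seen so far; same return value, simpler control flow.

-- ===== PORT A =====
-- shared helper: Python's _norm (both A and B define the identical _norm)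
def pvNorm (name : String) : String :=
  String.ofList ((PySem.Str.lower name).toList.filter PySem.Chars.isalnum)

def pvTotalLike : List String :=
  ["total", "annual", "yearly", "arr", "lifetime", "ltv",
   "grossrevenue", "totalrevenue", "totalcharge", "totalcharges"]
def pvRevenueLike : List String :=
  ["revenue", "sales", "income", "billing", "amount", "charge", "charges", "value"]
def pvMonthlyLike : List String := ["monthly", "month", "mrr"]

-- any(tok in n for tok in toks)
def pvAnyTok (toks : List String) (n : String) : Bool :=
  toks.any (fun tok => PySem.Str.isIn tok n)

-- one 'for n, col in normalized: if p(n): return col' loop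
def pvPass (p : String → Bool) : List (String × String) → Option String
  | [] => none
  | (n, c) :: rest => if p n then some c else pvPass p rest

def pick_at_risk_metric_py (financial_metrics : List String) : Option String :=
  if financial_metrics.isEmpty then none
  else
    let normalized := financial_metrics.map (fun col => (pvNorm col, col))
    match pvPass (fun n => pvAnyTok pvTotalLike n && pvAnyTok pvRevenueLike n) normalized with
    | some col => some col
    | none =>
      match pvPass (fun n => pvAnyTok pvRevenueLike n && !pvAnyTok pvMonthlyLike n) normalized with
      | some col => some col
      | none =>
        match pvPass (fun n => pvAnyTok pvMonthlyLike n && pvAnyTok pvRevenueLike n) normalized with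
        | some col => some col
        | none => PySem.List.pyGet? financial_metrics 0

-- ===== PORT B =====
def pvTier (n : String) : Nat :=
  if !pvAnyTok pvRevenueLike n then 4
  else if pvAnyTok pvTotalLike n then 1
  else if pvAnyTok pvMonthlyLike n then 3
  else 2

def pvStep (best : Nat × String) (col : String) : Nat × String :=
  let t := pvTier (pvNorm col)
  if t < best.1 then (t, col) else best

def pick_at_risk_metric_py_alt (financial_metrics : List String) : Option String :=
  match financial_metrics with
  | [] => none
  | h :: _ => some ((financial_metrics.foldl pvStep (4, h)).2)

-- ===== PRECONDITION & SPEC =====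
def Spec_pick_at_risk_metric_py (financial_metrics : List String) (out : Option String) : Prop := out = pick_at_risk_metric_py_alt financial_metrics
instance (financial_metrics : List String) (out : Option String) : Decidable (Spec_pick_at_risk_metric_py financial_metrics out) := by unfold Spec_pick_at_risk_metric_py; infer_instance

-- ===== CLAIM (what is proved, stated in full; the proofs are below) =====
def Claim_equal_pick_at_risk_metric_py : Prop := ∀ (financial_metrics : List String), Dom_pick_at_risk_metric_py financial_metrics → Spec_pick_at_risk_metric_py financial_metrics (pick_at_risk_metric_py financial_metrics)

-- ===== LEMMAS AND PROOFS =====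

-- the tier of a column name
def pvT (col : String) : Nat := pvTier (pvNorm col)

theorem pvTier_pos (n : String) : 1 ≤ pvTier n := by
  unfold pvTier; split_ifs <;> omega

theorem pvTier_lt_five (n : String) : pvTier n < 5 := by
  unfold pvTier; split_ifs <;> omega

theorem pvPass_map (p : String → Bool) (xs : List String) :
    pvPass p (xs.map (fun col => (pvNorm col, col))) = xs.find? (fun col => p (pvNorm col)) := by
  induction xs with
  | nil => rfl
  | cons x rest ih =>
      simp only [List.map_cons, pvPass, List.find?]
      by_cases h : p (pvNorm x) = true
      · simp [h]
      · simp [h, ih]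

theorem pvFind_congr {α : Type} (xs : List α) (p q : α → Bool)
    (h : ∀ x ∈ xs, p x = q x) : xs.find? p = xs.find? q := by
  induction xs with
  | nil => rfl
  | cons x rest ih =>
      simp only [List.find?]
      rw [h x (by simp)]
      cases hq : q x
      · exact ih (fun y hy => h y (by simp [hy]))
      · rfl

theorem pvP1_eq_tier (n : String) :
    (pvAnyTok pvTotalLike n && pvAnyTok pvRevenueLike n) = (pvTier n == 1) := by
  cases hr : pvAnyTok pvRevenueLike n <;> cases ht : pvAnyTok pvTotalLike n <;>
    cases hm : pvAnyTok pvMonthlyLike n <;> simp [pvTier, hr, ht, hm]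

theorem pvP2_eq_tier (n : String) (h1 : pvTier n ≠ 1) :
    (pvAnyTok pvRevenueLike n && !pvAnyTok pvMonthlyLike n) = (pvTier n == 2) := by
  cases hr : pvAnyTok pvRevenueLike n <;> cases ht : pvAnyTok pvTotalLike n <;>
    cases hm : pvAnyTok pvMonthlyLike n <;> simp [pvTier, hr, ht, hm] <;>
    simp [pvTier, hr, ht, hm] at h1

theorem pvP3_eq_tier (n : String) (h1 : pvTier n ≠ 1) :
    (pvAnyTok pvMonthlyLike n && pvAnyTok pvRevenueLike n) = (pvTier n == 3) := by
  cases hr : pvAnyTok pvRevenueLike n <;> cases ht : pvAnyTok pvTotalLike n <;>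
    cases hm : pvAnyTok pvMonthlyLike n <;> simp [pvTier, hr, ht, hm] <;>
    simp [pvTier, hr, ht, hm] at h1

-- folding from tier 1 never changes the state
theorem pvFold1 (xs : List String) (c : String) :
    xs.foldl pvStep (1, c) = (1, c) := by
  induction xs with
  | nil => rfl
  | cons x rest ih =>
      have := pvTier_pos (pvNorm x)
      simp only [List.foldl_cons, pvStep]
      rw [if_neg (by omega)]
      exact ih

theorem pvFold2 (xs : List String) (c : String) :
    (xs.foldl pvStep (2, c)).2 =
      (xs.find? (fun col => pvT col == 1)).getD c := by
  induction xs generalizing c with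
  | nil => rfl
  | cons x rest ih =>
      have hp := pvTier_pos (pvNorm x)
      simp only [List.foldl_cons, pvStep, List.find?]
      by_cases h : pvT x = 1
      · rw [if_pos (by simp [pvT] at h; omega)]
        simp [pvT] at h
        simp [pvT, h, pvFold1]
      · rw [if_neg (by simp [pvT] at h ⊢; omega)]
        have : (pvT x == 1) = false := by simp [h]
        simp [this, ih]

theorem pvFold3 (xs : List String) (c : String) :
    (xs.foldl pvStep (3, c)).2 =
      match xs.find? (fun col => pvT col == 1) with
      | some y => y
      | none => (xs.find? (fun col => pvT col == 2)).getD c := by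
  induction xs generalizing c with
  | nil => rfl
  | cons x rest ih =>
      have hp := pvTier_pos (pvNorm x)
      simp only [List.foldl_cons, pvStep, List.find?]
      by_cases h1 : pvT x = 1
      · rw [if_pos (by simp [pvT] at h1; omega)]
        simp [pvT] at h1
        simp [pvT, h1, pvFold1]
      · by_cases h2 : pvT x = 2
        · rw [if_pos (by simp [pvT] at h2; omega)]
          simp [pvT] at h2
          have e1 : (pvT x == 1) = false := by simp [pvT, h2]
          have e2 : (pvT x == 2) = true := by simp [pvT, h2]
          simp only [pvT, h2, e1]
          rw [pvFold2]
          simp only [pvT, e2]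
          cases List.find? (fun col => pvTier (pvNorm col) == 1) rest <;> simp
        · rw [if_neg (by simp [pvT] at h1 h2 ⊢; omega)]
          have e1 : (pvT x == 1) = false := by simp [h1]
          have e2 : (pvT x == 2) = false := by simp [h2]
          simp [e1, e2, ih]

theorem pvFold4 (xs : List String) (c : String) :
    (xs.foldl pvStep (4, c)).2 =
      match xs.find? (fun col => pvT col == 1) with
      | some y => y
      | none =>
        match xs.find? (fun col => pvT col == 2) with
        | some y => y
        | none => (xs.find? (fun col => pvT col == 3)).getD c := by
  induction xs generalizing c with
  | nil => rfl
  | cons x rest ih =>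
      have hp := pvTier_pos (pvNorm x)
      have hlt := pvTier_lt_five (pvNorm x)
      simp only [List.foldl_cons, pvStep, List.find?]
      by_cases h1 : pvT x = 1
      · rw [if_pos (by simp [pvT] at h1; omega)]
        simp [pvT] at h1
        simp [pvT, h1, pvFold1]
      · by_cases h2 : pvT x = 2
        · rw [if_pos (by simp [pvT] at h2; omega)]
          simp [pvT] at h2
          have e1 : (pvT x == 1) = false := by simp [pvT, h2]
          have e2 : (pvT x == 2) = true := by simp [pvT, h2]
          simp only [pvT, h2, e1]
          rw [pvFold2]
          simp only [pvT, e2]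
          cases List.find? (fun col => pvTier (pvNorm col) == 1) rest <;> simp
        · by_cases h3 : pvT x = 3
          · rw [if_pos (by simp [pvT] at h3; omega)]
            simp [pvT] at h3
            have e1 : (pvT x == 1) = false := by simp [pvT, h3]
            have e2 : (pvT x == 2) = false := by simp [pvT, h3]
            have e3 : (pvT x == 3) = true := by simp [pvT, h3]
            simp only [pvT, h3, e1, e2]
            rw [pvFold3]
            simp only [pvT, e3]
            cases List.find? (fun col => pvTier (pvNorm col) == 1) rest
            · cases List.find? (fun col => pvTier (pvNorm col) == 2) rest <;> rfl
            · rfl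
          · have h4 : pvT x = 4 := by simp [pvT] at h1 h2 h3 ⊢; omega
            rw [if_neg (by simp [pvT] at h4 ⊢; omega)]
            have e1 : (pvT x == 1) = false := by simp [h1]
            have e2 : (pvT x == 2) = false := by simp [h2]
            have e3 : (pvT x == 3) = false := by simp [h3]
            simp [e1, e2, e3, ih]

-- ===== VERDICT (by name: the statement is the Claim_ definition above) =====
theorem pick_at_risk_metric_py_spec : Claim_equal_pick_at_risk_metric_py := by
  intro fm _
  unfold Spec_pick_at_risk_metric_py pick_at_risk_metric_py pick_at_risk_metric_py_alt
  cases fm with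
  | nil => rfl
  | cons h rest =>
      rw [if_neg (by simp)]
      show (match pvPass (fun n => pvAnyTok pvTotalLike n && pvAnyTok pvRevenueLike n)
              ((h :: rest).map (fun col => (pvNorm col, col))) with
        | some col => some col
        | none =>
          match pvPass (fun n => pvAnyTok pvRevenueLike n && !pvAnyTok pvMonthlyLike n)
              ((h :: rest).map (fun col => (pvNorm col, col))) with
          | some col => some col
          | none =>
            match pvPass (fun n => pvAnyTok pvMonthlyLike n && pvAnyTok pvRevenueLike n)
                ((h :: rest).map (fun col => (pvNorm col, col))) with
            | some col => some col
            | none => PySem.List.pyGet? (h :: rest) 0) =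
        some ((List.foldl pvStep (4, h) (h :: rest)).2)
      rw [pvPass_map, pvPass_map, pvPass_map, pvFold4]
      rw [pvFind_congr _ _ (fun col => pvT col == 1) (fun x _ => pvP1_eq_tier (pvNorm x))]
      cases hf1 : (h :: rest).find? (fun col => pvT col == 1) with
      | some y => simp
      | none =>
          have hno1 : ∀ col ∈ h :: rest, pvT col ≠ 1 := by
            intro col hc
            have := List.find?_eq_none.mp hf1 col hc
            simpa using this
          rw [pvFind_congr _ _ (fun col => pvT col == 2)
                (fun x hx => pvP2_eq_tier (pvNorm x) (hno1 x hx))]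
          cases hf2 : (h :: rest).find? (fun col => pvT col == 2) with
          | some y => simp
          | none =>
              rw [pvFind_congr _ _ (fun col => pvT col == 3)
                    (fun x hx => pvP3_eq_tier (pvNorm x) (hno1 x hx))]
              cases hf3 : (h :: rest).find? (fun col => pvT col == 3) with
              | some y => simp
              | none =>
                  simp [PySem.List.pyGet?_zero_cons]
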